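-- pv_equiv track=rewrite | github.com/mitseng/propositional-calculator | propositionalcalculator.py | find_variables
-- ===== SOURCE A (Python) =====
-- def find_variables(p):  # return all variables in the string.
--     temp = [v for v in p if ('A' <= v <= 'Z') and v != 'T' and v != 'F']
--     variables = []
--     for v in temp:
--         if v not in variables:
--             variables.append(v)
--     variables.sort()
--     return tuple(variables)
-- ===== SOURCE B (Python) =====
-- def find_variables(p):  # return all variables in the string.
--     # iterate the candidate alphabet (A..Z minus T, F) in order; it is already
--     # distinct and sorted, so no dedup and no sort are needed
--     return tuple(c for c in "ABCDEGHIJKLMNOPQRSUVWXYZ" if c in p)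
-- ===== Notes on version B (the rewrite author's own statement) =====
-- stated objective: faster
-- what changed: Instead of scanning the input, deduplicating into a list and sorting it, B iterates the fixed 24-letter candidate alphabet in order and keeps each letter that occurs in the input (substring test), so no dedup list and no sort are needed; distinctness and sortedness come for free from the alphabet.
import Mathlib
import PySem

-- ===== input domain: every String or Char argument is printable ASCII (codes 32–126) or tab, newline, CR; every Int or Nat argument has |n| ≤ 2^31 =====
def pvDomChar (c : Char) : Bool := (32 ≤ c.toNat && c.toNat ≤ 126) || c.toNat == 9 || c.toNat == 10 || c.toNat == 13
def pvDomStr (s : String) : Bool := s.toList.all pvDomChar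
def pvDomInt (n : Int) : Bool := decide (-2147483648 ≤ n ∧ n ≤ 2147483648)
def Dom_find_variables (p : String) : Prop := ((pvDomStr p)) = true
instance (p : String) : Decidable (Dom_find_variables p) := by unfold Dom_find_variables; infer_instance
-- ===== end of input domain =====

-- B replaces A's scan-dedup-sort by one filter of the fixed candidate alphabet 'A'..'Z' minus 'T','F'
-- (already distinct and sorted), keeping the letters that occur in p; simpler, same exact result.

-- ===== PORT A =====
def find_variables (p : String) : List String :=
  let temp := p.toList.filter
    (fun v => (decide ('A' ≤ v) && decide (v ≤ 'Z')) && v != 'T' && v != 'F')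
  let vars := temp.foldl (fun acc v => if acc.contains v then acc else acc ++ [v]) []
  (PySem.List.sorted vars (fun x => x)).map (fun c => String.ofList [c])

-- ===== PORT B =====
-- the characters of Source B's literal "ABCDEGHIJKLMNOPQRSUVWXYZ"
def pvAlphabet : List Char :=
  ['A','B','C','D','E','G','H','I','J','K','L','M','N','O','P','Q','R','S','U','V','W','X','Y','Z']

def find_variables_alt (p : String) : List String :=
  (pvAlphabet.filter (fun c => PySem.Str.isIn (String.ofList [c]) p)).map
    (fun c => String.ofList [c])

-- ===== PRECONDITION & SPEC =====
def Spec_find_variables (p : String) (out : List String) : Prop := out = find_variables_alt p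
instance (p : String) (out : List String) : Decidable (Spec_find_variables p out) := by
  unfold Spec_find_variables; infer_instance

-- ===== CLAIM (what is proved, stated in full; the proofs are below) =====
def Claim_equal_find_variables : Prop :=
  ∀ (p : String), Dom_find_variables p → Spec_find_variables p (find_variables p)

-- ===== LEMMAS AND PROOFS =====
theorem pv_mem_alpha (c : Char) :
    c ∈ pvAlphabet ↔ (('A' ≤ c ∧ c ≤ 'Z') ∧ c ≠ 'T' ∧ c ≠ 'F') := by
  simp [pvAlphabet, Char.le_def, UInt32.le_iff_toNat_le, Char.ext_iff, UInt32.ext_iff]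
  omega

theorem pv_isIn_singleton (c : Char) (p : String) :
    PySem.Str.isIn (String.ofList [c]) p = true ↔ c ∈ p.toList := by
  rw [PySem.Str.isIn_iff_infix, String.toList_ofList, List.singleton_infix_iff]

theorem pv_alpha_pairwise : pvAlphabet.Pairwise (· < ·) := by decide

theorem pv_chars_eq (p : String) :
    PySem.List.sorted
      ((p.toList.filter
          (fun v => (decide ('A' ≤ v) && decide (v ≤ 'Z')) && v != 'T' && v != 'F')).foldl
        (fun acc v => if acc.contains v then acc else acc ++ [v]) [])
      (fun x => x)
    = pvAlphabet.filter (fun c => PySem.Str.isIn (String.ofList [c]) p) := by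
  have hfold : ∀ xs : List Char,
      xs.foldl (fun acc v => if acc.contains v then acc else acc ++ [v]) []
        = PySem.Set.ofList xs := fun _ => rfl
  rw [hfold]
  apply PySem.List.sorted_eq_of_perm_of_pairwise_lt
  · rw [List.perm_ext_iff_of_nodup
      (List.Nodup.filter _ (by decide)) (PySem.Set.nodup_ofList _)]
    intro a
    simp only [List.mem_filter, PySem.Set.mem_ofList, pv_isIn_singleton, pv_mem_alpha]
    simp only [Bool.and_eq_true, decide_eq_true_eq, bne_iff_ne]
    tauto
  · exact List.Pairwise.filter _ pv_alpha_pairwise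

-- ===== VERDICT (by name: the statement is the Claim_ definition above) =====
theorem find_variables_spec : Claim_equal_find_variables := by
  intro p _
  unfold Spec_find_variables find_variables find_variables_alt
  exact congrArg (List.map (fun c => String.ofList [c])) (pv_chars_eq p)
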